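-- pv_equiv track=rewrite | github.com/ucs200525/FlexiSched | ai_engine/timetable_config.py | _generate_slot_pattern
-- ===== SOURCE A (Python) =====
-- from typing import List, Dict, Optional, Tuple
--
-- def _generate_slot_pattern(
--                          available_slots: List[str],
--                          credits: int,
--                          grid_matrix: Dict[str, List[str]],
--                          section_variant: int) -> List[str]:
--     """Generate a slot pattern for a section, ensuring diversity across sections"""
--     pattern = []
--     used_days = set()
--
--     # Strategy: distribute slots across different days and time periods
--     day_slots = {}
--     for day, slots in grid_matrix.items():
--         day_slots[day] = [s for s in slots if s in available_slots]
--
--     # For different section variants, use different strategies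
--     if section_variant == 0:
--         # Section 1: Prefer morning slots, spread across days
--         preference_order = ["Monday", "Wednesday", "Friday", "Tuesday", "Thursday"]
--     else:
--         # Section 2: Prefer afternoon slots, different day pattern
--         preference_order = ["Tuesday", "Thursday", "Monday", "Wednesday", "Friday"]
--
--     slots_needed = credits
--     for day in preference_order:
--         if slots_needed <= 0:
--             break
--
--         if day in day_slots and day_slots[day]:
--             # For variant 0, prefer earlier slots; for variant 1, prefer later slots
--             day_available = day_slots[day]
--             if section_variant == 0:
--                 slot = day_available[0] if day_available else None
--             else:
--                 slot = day_available[-1] if day_available else None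
--
--             if slot and slot not in pattern:
--                 pattern.append(slot)
--                 slots_needed -= 1
--                 used_days.add(day)
--
--     # If still need more slots, fill from remaining available slots
--     while slots_needed > 0 and available_slots:
--         for slot in available_slots:
--             if slot not in pattern:
--                 pattern.append(slot)
--                 slots_needed -= 1
--                 break
--         else:
--             break
--
--     return pattern[:credits]  # Ensure we don't exceed required credits
-- ===== SOURCE B (Python) =====
-- def _generate_slot_pattern(available_slots, credits, grid_matrix, section_variant):
--     """Build one ordered candidate sequence (best slot per preferred day, then all
--     available slots), dedupe it keeping first occurrences, and take `credits`."""
--     if section_variant == 0: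
--         preference_order = ["Monday", "Wednesday", "Friday", "Tuesday", "Thursday"]
--     else:
--         preference_order = ["Tuesday", "Thursday", "Monday", "Wednesday", "Friday"]
--     candidates = []
--     for day in preference_order:
--         filtered = [s for s in grid_matrix.get(day, []) if s in available_slots]
--         if filtered:
--             slot = filtered[0] if section_variant == 0 else filtered[-1]
--             if slot:  # a blank slot name is never scheduled
--                 candidates.append(slot)
--     candidates.extend(available_slots)
--     if credits <= 0:
--         return []
--     seen = set()
--     ordered = []
--     for s in candidates:
--         if s not in seen:
--             seen.add(s)
--             ordered.append(s)
--     return ordered[:credits]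
-- ===== Notes on version B (the rewrite author's own statement) =====
-- stated objective: simpler
-- what changed: Replaces A's two stateful loops (a counted preference-day loop plus a restart-scanning while/for-else fill loop over available_slots) with a single build: form one ordered candidate list (best slot per preferred day, then all available slots), dedupe it preserving first occurrence, and take the first `credits` entries.
import Mathlib
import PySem

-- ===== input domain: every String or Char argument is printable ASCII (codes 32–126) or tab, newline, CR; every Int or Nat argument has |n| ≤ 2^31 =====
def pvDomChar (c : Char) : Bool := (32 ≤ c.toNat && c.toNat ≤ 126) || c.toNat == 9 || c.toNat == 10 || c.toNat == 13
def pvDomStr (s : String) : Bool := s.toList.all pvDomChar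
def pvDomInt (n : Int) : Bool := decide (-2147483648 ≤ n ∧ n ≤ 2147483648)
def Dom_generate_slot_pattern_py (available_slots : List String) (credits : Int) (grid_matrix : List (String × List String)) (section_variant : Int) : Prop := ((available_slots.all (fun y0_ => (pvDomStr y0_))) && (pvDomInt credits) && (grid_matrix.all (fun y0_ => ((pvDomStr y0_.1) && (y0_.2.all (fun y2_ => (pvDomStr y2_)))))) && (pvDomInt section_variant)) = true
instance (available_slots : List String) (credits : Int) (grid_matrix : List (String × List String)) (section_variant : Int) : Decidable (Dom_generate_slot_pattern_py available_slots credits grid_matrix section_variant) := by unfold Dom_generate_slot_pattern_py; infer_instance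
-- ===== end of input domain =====

-- B replaces A's two stateful loops by one candidate list + a dedupe pass + take; same results, simpler shape.
-- (A's `used_days` set is written but never read, so neither port carries it.)

-- ===== PORT A =====
-- the trailing `while slots_needed > 0 and available_slots:` / for-else fill loop of A,
-- transliterated as recursion on the remaining count (each pass appends one slot or breaks)
def pvFillLoop (available_slots : List String) (pattern : List String) (needed : Int) : List String :=
  if h : 0 < needed ∧ available_slots ≠ [] then
    match available_slots.find? (fun s => !pattern.contains s) with
    | some s => pvFillLoop available_slots (pattern ++ [s]) (needed - 1)
    | none => pattern
  else pattern
termination_by needed.toNat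
decreasing_by omega

def generate_slot_pattern_py (available_slots : List String) (credits : Int) (grid_matrix : List (String × List String)) (section_variant : Int) : List String :=
  -- day_slots = {day: [s for s in slots if s in available_slots] for day, slots in grid_matrix.items()}
  let day_slots : PySem.Dict String (List String) :=
    grid_matrix.foldl (fun d kv => d.insert kv.1 (kv.2.filter (fun s => available_slots.contains s))) PySem.Dict.empty
  let preference_order : List String :=
    if section_variant == 0 then ["Monday", "Wednesday", "Friday", "Tuesday", "Thursday"]
    else ["Tuesday", "Thursday", "Monday", "Wednesday", "Friday"]
  -- the preference-day loop; state = (pattern, slots_needed); the `break` is the slots_needed ≤ 0 guard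
  let st := preference_order.foldl (fun (st : List String × Int) day =>
    if st.2 ≤ 0 then st
    else match day_slots.get? day with
      | none => st
      | some day_available =>
        if day_available.isEmpty then st
        else
          match (if section_variant == 0 then PySem.List.pyGet? day_available 0
                 else PySem.List.pyGet? day_available (-1)) with
          | none => st
          | some slot =>
            if slot ≠ "" && !(st.1.contains slot) then (st.1 ++ [slot], st.2 - 1) else st)
    ([], credits)
  let pattern := pvFillLoop available_slots st.1 st.2
  PySem.List.slice pattern none (some credits)   -- pattern[:credits]

-- ===== PORT B =====
def generate_slot_pattern_py_alt (available_slots : List String) (credits : Int) (grid_matrix : List (String × List String)) (section_variant : Int) : List String :=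
  let g : PySem.Dict String (List String) := PySem.Dict.ofList grid_matrix
  let preference_order : List String :=
    if section_variant == 0 then ["Monday", "Wednesday", "Friday", "Tuesday", "Thursday"]
    else ["Tuesday", "Thursday", "Monday", "Wednesday", "Friday"]
  -- candidates: best slot of each preferred day (filtered[0] / filtered[-1]), blanks skipped
  let candidates := preference_order.foldl (fun (acc : List String) day =>
    let filtered := (g.getD day []).filter (fun s => available_slots.contains s)
    match (if section_variant == 0 then PySem.List.pyGet? filtered 0
           else PySem.List.pyGet? filtered (-1)) with
    | some slot => if slot ≠ "" then acc ++ [slot] else acc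
    | none => acc) []
  let candidates := candidates ++ available_slots
  if credits ≤ 0 then []
  else
    -- seen-set dedupe keeping first occurrences, then ordered[:credits]
    let dd := candidates.foldl (fun (st : PySem.Set String × List String) s =>
      if st.1.contains s then st else (st.1.add s, st.2 ++ [s])) (PySem.Set.empty, [])
    dd.2.take credits.toNat

-- ===== PRECONDITION & SPEC =====
def Spec_generate_slot_pattern_py (available_slots : List String) (credits : Int) (grid_matrix : List (String × List String)) (section_variant : Int) (out : List String) : Prop := out = generate_slot_pattern_py_alt available_slots credits grid_matrix section_variant
instance (available_slots : List String) (credits : Int) (grid_matrix : List (String × List String)) (section_variant : Int) (out : List String) : Decidable (Spec_generate_slot_pattern_py available_slots credits grid_matrix section_variant out) := by unfold Spec_generate_slot_pattern_py; infer_instance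

-- ===== CLAIM (what is proved, stated in full; the proofs are below) =====
def Claim_equal_generate_slot_pattern_py : Prop := ∀ (available_slots : List String) (credits : Int) (grid_matrix : List (String × List String)) (section_variant : Int), Dom_generate_slot_pattern_py available_slots credits grid_matrix section_variant → Spec_generate_slot_pattern_py available_slots credits grid_matrix section_variant (generate_slot_pattern_py available_slots credits grid_matrix section_variant)

-- ===== LEMMAS AND PROOFS =====

-- the one greedy step both loops of A perform on a candidate slot
def pvStep (st : List String × Int) (c : String) : List String × Int :=
  if st.2 ≤ 0 then st else if st.1.contains c then st else (st.1 ++ [c], st.2 - 1)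

-- the dedupe step of B
def pvDStep (st : PySem.Set String × List String) (s : String) : PySem.Set String × List String :=
  if st.1.contains s then st else (st.1.add s, st.2 ++ [s])

-- the candidate a day contributes according to A's per-day body
def pvCandA (section_variant : Int) (day_slots : PySem.Dict String (List String)) (day : String) : Option String :=
  match day_slots.get? day with
  | none => none
  | some day_available =>
    if day_available.isEmpty then none
    else
      match (if section_variant == 0 then PySem.List.pyGet? day_available 0
             else PySem.List.pyGet? day_available (-1)) with
      | some slot => if slot = "" then none else some slot
      | none => none

-- the candidate a day contributes according to B's per-day body
def pvCand (available_slots : List String) (g : PySem.Dict String (List String)) (section_variant : Int) (day : String) : Option String :=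
  let filtered := (g.getD day []).filter (fun s => available_slots.contains s)
  match (if section_variant == 0 then PySem.List.pyGet? filtered 0
         else PySem.List.pyGet? filtered (-1)) with
  | some slot => if slot = "" then none else some slot
  | none => none

theorem pv_foldl_step_stuck (l : List String) (pattern : List String) (n : Int) (h : n ≤ 0) :
    l.foldl pvStep (pattern, n) = (pattern, n) := by
  induction l with
  | nil => rfl
  | cons c l ih => simpa [pvStep, h] using ih

theorem pvStep_of_contains (st : List String × Int) (c : String) (h : st.1.contains c = true) :
    pvStep st c = st := by
  unfold pvStep
  split
  · rfl
  · simp [h]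

theorem pv_foldl_step_of_all_mem' (l : List String) : ∀ (st : List String × Int),
    (∀ c ∈ l, st.1.contains c = true) → l.foldl pvStep st = st := by
  induction l with
  | nil => intro st _; rfl
  | cons c l ih =>
    intro st h
    rw [List.foldl_cons, pvStep_of_contains st c (h c (by simp))]
    exact ih st (fun c hcl => h c (by simp [hcl]))

theorem pv_fillLoop_eq_foldl (avail : List String) : ∀ (pattern : List String) (n : Int),
    pvFillLoop avail pattern n = (avail.foldl pvStep (pattern, n)).1 := by
  intro pattern n
  fun_induction pvFillLoop avail pattern n with
  | case1 pattern n h s hf ih =>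
    obtain ⟨hps, as, bs, hl, hall⟩ := List.find?_eq_some_iff_append.mp hf
    have hps' : pattern.contains s = false := by simpa using hps
    have hall' : ∀ a ∈ as, pattern.contains a = true := by
      intro a ha
      simpa using hall a ha
    have hmem1 : ∀ a ∈ as, (pattern ++ [s]).contains a = true := by
      intro a ha
      have := hall' a ha
      simp [List.contains_eq_mem] at this ⊢
      exact Or.inl this
    rw [ih, hl, List.foldl_append, List.foldl_append,
      pv_foldl_step_of_all_mem' as (pattern, n) hall',
      pv_foldl_step_of_all_mem' as (pattern ++ [s], n - 1) hmem1,
      List.foldl_cons, List.foldl_cons]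
    have hn0 : ¬ n ≤ 0 := by omega
    have hsp : s ∉ pattern := by simpa [List.contains_eq_mem] using hps'
    have h1 : pvStep (pattern, n) s = (pattern ++ [s], n - 1) := by
      simp [pvStep, hn0, List.contains_eq_mem, hsp]
    have h2 : pvStep (pattern ++ [s], n - 1) s = (pattern ++ [s], n - 1) := by
      apply pvStep_of_contains
      simp [List.contains_eq_mem]
    rw [h1, h2]
  | case2 pattern n h hf =>
    have hall : ∀ c ∈ avail, pattern.contains c = true := by
      intro c hc
      have := List.find?_eq_none.mp hf c hc
      simpa using this
    rw [pv_foldl_step_of_all_mem' avail (pattern, n) hall]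
  | case3 pattern n h =>
    by_cases hnil : avail = []
    · subst hnil; rfl
    · have hn : n ≤ 0 := by
        by_contra hpos
        exact h ⟨by omega, hnil⟩
      rw [pv_foldl_step_stuck avail pattern n hn]

theorem pv_dayloop_eq_foldl_step (section_variant : Int)
    (g : PySem.Dict String (List String)) (days : List String) (st : List String × Int) :
    days.foldl (fun (st : List String × Int) day =>
      if st.2 ≤ 0 then st
      else match g.get? day with
        | none => st
        | some day_available =>
          if day_available.isEmpty then st
          else
            match (if section_variant == 0 then PySem.List.pyGet? day_available 0
                   else PySem.List.pyGet? day_available (-1)) with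
            | none => st
            | some slot =>
              if slot ≠ "" && !(st.1.contains slot) then (st.1 ++ [slot], st.2 - 1) else st) st
    = (days.filterMap (pvCandA section_variant g)).foldl pvStep st := by
  induction days generalizing st with
  | nil => rfl
  | cons day days ih =>
    rw [List.foldl_cons, List.filterMap_cons]
    have hbody : (if st.2 ≤ 0 then st
      else match g.get? day with
        | none => st
        | some day_available =>
          if day_available.isEmpty then st
          else
            match (if section_variant == 0 then PySem.List.pyGet? day_available 0
                   else PySem.List.pyGet? day_available (-1)) with
            | none => st
            | some slot =>
              if slot ≠ "" && !(st.1.contains slot) then (st.1 ++ [slot], st.2 - 1) else st)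
      = (match pvCandA section_variant g day with
         | none => st
         | some c => pvStep st c) := by
      unfold pvCandA pvStep
      rcases hn : g.get? day with _ | l
      · split <;> simp
      · by_cases he : l.isEmpty <;> simp only [he]
        · split <;> simp
        · rcases hs : (if section_variant == 0 then PySem.List.pyGet? l 0
                       else PySem.List.pyGet? l (-1)) with _ | slot
          · split <;> simp
          · by_cases hsl : slot = "" <;> by_cases hle : st.2 ≤ 0 <;>
              by_cases hm : st.1.contains slot <;> simp [hsl, hle, hm]
    rw [hbody]
    rcases pvCandA section_variant g day with _ | c
    · exact ih st
    · rw [List.foldl_cons]; exact ih _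

-- day_slots (A's dict of pre-filtered slot lists) looked up = B's dict looked up, then filtered
theorem pv_get?_foldl_insert_filter (f : List String → List String)
    (l : List (String × List String)) :
    ∀ (d d' : PySem.Dict String (List String)),
    (∀ k, d.get? k = (d'.get? k).map f) →
    ∀ k, (l.foldl (fun d kv => d.insert kv.1 (f kv.2)) d).get? k
      = ((l.foldl (fun d kv => d.insert kv.1 kv.2) d').get? k).map f := by
  induction l with
  | nil => intro d d' h k; exact h k
  | cons kv l ih =>
    intro d d' h k
    rw [List.foldl_cons, List.foldl_cons]
    refine ih _ _ (fun k' => ?_) k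
    rw [PySem.Dict.get?_insert, PySem.Dict.get?_insert]
    split
    · simp
    · exact h k'

theorem pv_candA_eq_cand (available_slots : List String) (section_variant : Int)
    (grid_matrix : List (String × List String)) (day : String) :
    pvCandA section_variant
      (grid_matrix.foldl (fun d kv => d.insert kv.1 (kv.2.filter (fun s => available_slots.contains s))) PySem.Dict.empty) day
    = pvCand available_slots (PySem.Dict.ofList grid_matrix) section_variant day := by
  have hg := pv_get?_foldl_insert_filter (fun v => v.filter (fun s => available_slots.contains s))
    grid_matrix PySem.Dict.empty PySem.Dict.empty (by intro k; simp [PySem.Dict.get?_empty]) day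
  unfold pvCandA pvCand
  rw [hg]
  have : PySem.Dict.ofList grid_matrix = grid_matrix.foldl (fun d kv => d.insert kv.1 kv.2) PySem.Dict.empty := rfl
  rw [PySem.Dict.getD_eq_get?_getD, this]
  rcases h : (grid_matrix.foldl (fun d kv => d.insert kv.1 kv.2) PySem.Dict.empty).get? day with _ | v <;> rw [h]
  · simp [PySem.List.pyGet?, PySem.List.pyIdx?]
  · simp only [Option.map_some, Option.getD_some]
    by_cases he : (v.filter (fun s => available_slots.contains s)) = []
    · simp only [List.contains_eq_mem] at he
      simp only [List.contains_eq_mem, he]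
      simp [PySem.List.pyGet?, PySem.List.pyIdx?]
    · simp only [List.contains_eq_mem] at he
      simp [List.contains_eq_mem, he]

-- B's candidate-building foldl is acc ++ filterMap pvCand
theorem pv_bloop_eq_filterMap (available_slots : List String) (section_variant : Int)
    (g : PySem.Dict String (List String)) (days : List String) : ∀ (acc : List String),
    days.foldl (fun (acc : List String) day =>
      let filtered := (g.getD day []).filter (fun s => available_slots.contains s)
      match (if section_variant == 0 then PySem.List.pyGet? filtered 0
             else PySem.List.pyGet? filtered (-1)) with
      | some slot => if slot ≠ "" then acc ++ [slot] else acc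
      | none => acc) acc
    = acc ++ days.filterMap (pvCand available_slots g section_variant) := by
  induction days with
  | nil => simp
  | cons day days ih =>
    intro acc
    rw [List.foldl_cons, List.filterMap_cons]
    have hbody : ∀ acc : List String, (match (if section_variant == 0
              then PySem.List.pyGet? ((g.getD day []).filter (fun s => available_slots.contains s)) 0
              else PySem.List.pyGet? ((g.getD day []).filter (fun s => available_slots.contains s)) (-1)) with
      | some slot => if slot ≠ "" then acc ++ [slot] else acc
      | none => acc)
      = (match pvCand available_slots g section_variant day with
         | none => acc
         | some c => acc ++ [c]) := by
      intro acc
      simp only [pvCand]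
      rcases h : (if section_variant == 0
              then PySem.List.pyGet? ((g.getD day []).filter (fun s => available_slots.contains s)) 0
              else PySem.List.pyGet? ((g.getD day []).filter (fun s => available_slots.contains s)) (-1)) with _ | slot
      · rfl
      · by_cases hsl : slot = "" <;> simp [hsl]
    rw [hbody]
    rcases pvCand available_slots g section_variant day with _ | c
    · rw [ih]
    · rw [ih]; simp

-- the dedupe fold's output component starts from its accumulator
theorem pv_dd_out (l : List String) : ∀ (seen : PySem.Set String) (out : List String),
    (l.foldl pvDStep (seen, out)).2 = out ++ (l.foldl pvDStep (seen, [])).2 := by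
  induction l with
  | nil => simp
  | cons s l ih =>
    intro seen out
    rw [List.foldl_cons, List.foldl_cons]
    by_cases hm : seen.contains s = true
    · have hm' : s ∈ seen := by
        simpa [PySem.Set.contains_eq_listContains, List.contains_eq_mem] using hm
      have h1 : pvDStep (seen, out) s = (seen, out) := by simp [pvDStep, hm']
      have h2 : pvDStep (seen, []) s = (seen, []) := by simp [pvDStep, hm']
      rw [h1, h2]; exact ih seen out
    · have hm' : s ∉ seen := by
        simpa [PySem.Set.contains_eq_listContains, List.contains_eq_mem] using hm
      have h1 : pvDStep (seen, out) s = (seen.add s, out ++ [s]) := by simp [pvDStep, hm']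
      have h2 : pvDStep (seen, []) s = (seen.add s, [s]) := by simp [pvDStep, hm']
      rw [h1, h2, ih _ (out ++ [s]), ih _ [s]]
      simp

-- MAIN: the greedy counted fold over candidates is dedupe-then-take
theorem pv_main (l : List String) : ∀ (pattern : List String) (seen : PySem.Set String) (n : Int),
    (∀ x, seen.contains x = pattern.contains x) → 0 ≤ n →
    (l.foldl pvStep (pattern, n)).1 = pattern ++ (l.foldl pvDStep (seen, [])).2.take n.toNat := by
  induction l with
  | nil => intro pattern seen n _ _; simp
  | cons c l ih =>
    intro pattern seen n hseen hn
    by_cases hzero : n ≤ 0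
    · rw [pv_foldl_step_stuck _ _ _ hzero]
      have : n = 0 := le_antisymm hzero hn
      simp [this]
    · have hpos : 0 < n := lt_of_not_ge hzero
      rw [List.foldl_cons, List.foldl_cons]
      by_cases hm : pattern.contains c = true
      · have hm' : c ∈ pattern := by simpa [List.contains_eq_mem] using hm
        have : pvStep (pattern, n) c = (pattern, n) := by simp [pvStep, hzero, hm']
        rw [this]
        have hsc : seen.contains c = true := (hseen c).trans hm
        have hsc' : c ∈ seen := by
          simpa [PySem.Set.contains_eq_listContains, List.contains_eq_mem] using hsc
        have : pvDStep (seen, []) c = (seen, []) := by simp [pvDStep, hsc']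
        rw [this]
        exact ih pattern seen n hseen hn
      · have hm' : c ∉ pattern := by simpa [List.contains_eq_mem] using hm
        have hstep : pvStep (pattern, n) c = (pattern ++ [c], n - 1) := by
          simp [pvStep, hzero, hm']
        have hscf : seen.contains c = false := by rw [hseen]; simpa using hm
        have hsc' : c ∉ seen := by
          simpa [PySem.Set.contains_eq_listContains, List.contains_eq_mem] using hscf
        have hd : pvDStep (seen, []) c = (seen.add c, [c]) := by simp [pvDStep, hsc']
        rw [hstep, hd, pv_dd_out l (seen.add c) [c]]
        have hcp : c ∉ pattern := by simpa [List.contains_eq_mem] using hm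
        have h3 : ∀ x, x ∈ seen ↔ x ∈ pattern := by
          intro x
          simpa [PySem.Set.contains_eq_listContains, List.contains_eq_mem] using hseen x
        have hcs : c ∉ seen := fun hin => hcp ((h3 c).mp hin)
        have hinv : ∀ x, (seen.add c).contains x = (pattern ++ [c]).contains x := by
          intro x
          rw [PySem.Set.add_of_not_mem hcs]
          simp [PySem.Set.contains_eq_listContains, List.contains_eq_mem, List.mem_append, h3 x]
        rw [ih (pattern ++ [c]) (seen.add c) (n - 1) hinv (by omega)]
        have : n.toNat = (n - 1).toNat + 1 := by omega
        rw [this]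
        simp
  

theorem pv_filterMap_eq (available_slots : List String) (section_variant : Int)
    (grid_matrix : List (String × List String)) (days : List String) :
    days.filterMap (pvCandA section_variant
      (grid_matrix.foldl (fun d kv => d.insert kv.1 (kv.2.filter (fun s => available_slots.contains s))) PySem.Dict.empty))
    = days.filterMap (pvCand available_slots (PySem.Dict.ofList grid_matrix) section_variant) := by
  apply List.filterMap_congr
  intro day _
  exact pv_candA_eq_cand available_slots section_variant grid_matrix day

theorem generate_slot_pattern_py_spec : Claim_equal_generate_slot_pattern_py := by
  intro available_slots credits grid_matrix section_variant _
  unfold Spec_generate_slot_pattern_py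
  simp only [generate_slot_pattern_py, generate_slot_pattern_py_alt]
  rw [pv_dayloop_eq_foldl_step, pv_bloop_eq_filterMap, pv_filterMap_eq]
  set cands := (if section_variant == 0 then ["Monday", "Wednesday", "Friday", "Tuesday", "Thursday"]
    else ["Tuesday", "Thursday", "Monday", "Wednesday", "Friday"]).filterMap
      (pvCand available_slots (PySem.Dict.ofList grid_matrix) section_variant) with hcands
  by_cases hc : credits ≤ 0
  · rw [if_pos hc, pv_foldl_step_stuck cands [] credits hc]
    simp only []
    rw [pv_fillLoop_eq_foldl, pv_foldl_step_stuck available_slots [] credits hc]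
    simp [PySem.List.slice]
  · rw [if_neg hc]
    rw [pv_fillLoop_eq_foldl, ← List.foldl_append]
    have hdd : (fun (st : PySem.Set String × List String) s =>
        if st.1.contains s then st else (st.1.add s, st.2 ++ [s])) = pvDStep := rfl
    rw [List.nil_append, hdd]
    rw [pv_main (cands ++ available_slots) [] PySem.Set.empty credits
      (by intro x; rfl) (by omega)]
    rw [List.nil_append, PySem.List.slice_to _ (by omega : (0:Int) ≤ credits)]
    simp [List.take_take]
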